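-- pv_equiv track=rewrite | github.com/jrb00013/gotzi-probe | src/udp_probe/discovery/discover_cli.py | pick_http_port
-- ===== SOURCE A (Python) =====
-- from typing import List, Optional, Tuple
--
-- def pick_http_port(ports: list) -> Optional[Tuple[int, bool]]:
--     for p in (80, 8080, 8000, 8008, 9080, 8888, 3000, 5000):
--         if p in ports:
--             return (p, False)
--     for p in (443, 8443, 9443):
--         if p in ports:
--             return (p, True)
--     return None
-- ===== SOURCE B (Python) =====
-- _TABLE = {
--     80: (0, False), 8080: (1, False), 8000: (2, False), 8008: (3, False),
--     9080: (4, False), 8888: (5, False), 3000: (6, False), 5000: (7, False),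
--     443: (8, True), 8443: (9, True), 9443: (10, True),
-- }
--
-- def pick_http_port(ports: list):
--     best = None  # (rank, port, https) with the smallest rank seen so far
--     for p in ports:
--         info = _TABLE.get(p)
--         if info is not None:
--             rank, https = info
--             if best is None or rank < best[0]:
--                 best = (rank, p, https)
--     if best is None:
--         return None
--     return (best[1], best[2])
-- ===== Notes on version B (the rewrite author's own statement) =====
-- stated objective: alternative
-- what changed: B replaces A's two candidate-order loops with repeated membership scans by a single pass over the input list, keeping the running minimum-priority candidate via a precomputed rank table.
import Mathlib
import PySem

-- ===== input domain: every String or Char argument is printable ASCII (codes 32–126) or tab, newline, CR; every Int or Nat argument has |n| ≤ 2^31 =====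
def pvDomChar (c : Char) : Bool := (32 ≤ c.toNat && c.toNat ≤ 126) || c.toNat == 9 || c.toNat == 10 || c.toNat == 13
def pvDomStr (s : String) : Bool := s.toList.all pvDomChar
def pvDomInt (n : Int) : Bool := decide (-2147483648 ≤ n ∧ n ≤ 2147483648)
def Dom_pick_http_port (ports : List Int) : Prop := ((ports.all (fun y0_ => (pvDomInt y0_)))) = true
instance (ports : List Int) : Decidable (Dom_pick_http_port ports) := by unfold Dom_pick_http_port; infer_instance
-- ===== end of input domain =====

-- B replaces A's candidate-order scans of `ports` by a single pass over `ports` keeping the minimum-rank candidate from a rank table (objective: alternative).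


-- ===== PORT A =====
-- A scans the fixed candidate tuples in priority order and tests membership in `ports`.
def pickLoopA (ports : List Int) : List Int → Option Int
  | [] => none
  | c :: cs => if c ∈ ports then some c else pickLoopA ports cs

def pick_http_port (ports : List Int) : Option (Int × Bool) :=
  match pickLoopA ports [80, 8080, 8000, 8008, 9080, 8888, 3000, 5000] with
  | some p => some (p, false)
  | none =>
    match pickLoopA ports [443, 8443, 9443] with
    | some p => some (p, true)
    | none => none

-- ===== PORT B =====
-- B makes a single pass over `ports`, looking each port up in a rank table and
-- keeping the entry with the smallest rank (triple (rank, port, https)).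
def pickTable : PySem.Dict Int (Int × Bool) :=
  PySem.Dict.ofList [(80, (0, false)), (8080, (1, false)), (8000, (2, false)),
    (8008, (3, false)), (9080, (4, false)), (8888, (5, false)), (3000, (6, false)),
    (5000, (7, false)), (443, (8, true)), (8443, (9, true)), (9443, (10, true))]

def pickStepB (best : Option (Int × Int × Bool)) (p : Int) : Option (Int × Int × Bool) :=
  match pickTable.get? p with
  | none => best
  | some (r, h) =>
    match best with
    | none => some (r, p, h)
    | some (r0, p0, h0) => if r < r0 then some (r, p, h) else some (r0, p0, h0)

def pick_http_port_alt (ports : List Int) : Option (Int × Bool) :=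
  match ports.foldl pickStepB none with
  | none => none
  | some (_, p, h) => some (p, h)

-- ===== PRECONDITION & SPEC =====
def Spec_pick_http_port (ports : List Int) (out : Option (Int × Bool)) : Prop := out = pick_http_port_alt ports
instance (ports : List Int) (out : Option (Int × Bool)) : Decidable (Spec_pick_http_port ports out) := by unfold Spec_pick_http_port; infer_instance

-- ===== CLAIM (what is proved, stated in full; the proofs are below) =====
def Claim_equal_pick_http_port : Prop := ∀ (ports : List Int), Dom_pick_http_port ports → Spec_pick_http_port ports (pick_http_port ports)

-- ===== LEMMAS AND PROOFS =====

-- left-biased min by rank (first component)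
def pvMerge (a b : Option (Int × Int × Bool)) : Option (Int × Int × Bool) :=
  match a, b with
  | none, b => b
  | some a, none => some a
  | some a, some b => if b.1 < a.1 then some b else some a

-- what one lookup contributes
def pvToOpt (p : Int) : Option (Int × Int × Bool) :=
  match pickTable.get? p with
  | none => none
  | some (r, h) => some (r, p, h)

-- first triple in the table list whose port is in `ports`
def pvScan (ports : List Int) : List (Int × Int × Bool) → Option (Int × Int × Bool)
  | [] => none
  | t :: L => if t.2.1 ∈ ports then some t else pvScan ports L

def pvFindP (p : Int) : List (Int × Int × Bool) → Option (Int × Int × Bool)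
  | [] => none
  | t :: L => if t.2.1 = p then some t else pvFindP p L

def pvTriples : List (Int × Int × Bool) :=
  [(0, 80, false), (1, 8080, false), (2, 8000, false), (3, 8008, false), (4, 9080, false),
   (5, 8888, false), (6, 3000, false), (7, 5000, false), (8, 443, true), (9, 8443, true),
   (10, 9443, true)]

def pvFinish (o : Option (Int × Int × Bool)) : Option (Int × Bool) :=
  match o with
  | none => none
  | some (_, p, h) => some (p, h)

theorem pvMerge_assoc (a b c : Option (Int × Int × Bool)) :
    pvMerge (pvMerge a b) c = pvMerge a (pvMerge b c) := by
  rcases a with _ | a <;> rcases b with _ | b <;> rcases c with _ | c <;>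
    simp only [pvMerge] <;> split_ifs <;>
      first
        | rfl
        | (exfalso; omega)
        | (simp only [pvMerge]; split_ifs <;> first | rfl | (exfalso; omega))

theorem pickStepB_eq_merge (acc : Option (Int × Int × Bool)) (p : Int) :
    pickStepB acc p = pvMerge acc (pvToOpt p) := by
  unfold pickStepB pvToOpt pvMerge
  rcases acc with _ | ⟨r0, p0, h0⟩ <;>
    rcases h : pickTable.get? p with _ | ⟨r, h'⟩ <;> simp

theorem foldl_pickStepB_merge (ports : List Int) (acc : Option (Int × Int × Bool)) :
    ports.foldl pickStepB acc = pvMerge acc (ports.foldl pickStepB none) := by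
  induction ports generalizing acc with
  | nil => cases acc <;> simp [pvMerge]
  | cons p ps ih =>
    simp only [List.foldl_cons]
    rw [ih (pickStepB acc p), ih (pickStepB none p),
        pickStepB_eq_merge acc p, pickStepB_eq_merge none p]
    simp only [pvMerge]
    exact pvMerge_assoc acc (pvToOpt p) (ps.foldl pickStepB none)

set_option maxHeartbeats 1000000 in
theorem pickTable_eq_mk : pickTable = PySem.Dict.mk
    [(80, (0, false)), (8080, (1, false)), (8000, (2, false)), (8008, (3, false)),
     (9080, (4, false)), (8888, (5, false)), (3000, (6, false)), (5000, (7, false)),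
     (443, (8, true)), (8443, (9, true)), (9443, (10, true))] := by decide

theorem pvToOpt_eq_findP (p : Int) : pvToOpt p = pvFindP p pvTriples := by
  unfold pvToOpt
  rw [pickTable_eq_mk]
  have hnil : (PySem.Dict.mk ([] : List (Int × (Int × Bool)))).get? p = none := rfl
  simp only [pvFindP, pvTriples, PySem.Dict.get?_mk_cons, beq_iff_eq, hnil]
  by_cases h0 : (80 : Int) = p
  · simp [h0]
  · simp only [if_neg h0]
    by_cases h1 : (8080 : Int) = p
    · simp [h1]
    · simp only [if_neg h1]
      by_cases h2 : (8000 : Int) = p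
      · simp [h2]
      · simp only [if_neg h2]
        by_cases h3 : (8008 : Int) = p
        · simp [h3]
        · simp only [if_neg h3]
          by_cases h4 : (9080 : Int) = p
          · simp [h4]
          · simp only [if_neg h4]
            by_cases h5 : (8888 : Int) = p
            · simp [h5]
            · simp only [if_neg h5]
              by_cases h6 : (3000 : Int) = p
              · simp [h6]
              · simp only [if_neg h6]
                by_cases h7 : (5000 : Int) = p
                · simp [h7]
                · simp only [if_neg h7]
                  by_cases h8 : (443 : Int) = p
                  · simp [h8]
                  · simp only [if_neg h8]
                    by_cases h9 : (8443 : Int) = p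
                    · simp [h9]
                    · simp only [if_neg h9]
                      by_cases h10 : (9443 : Int) = p
                      · simp [h10]
                      · simp only [if_neg h10]

theorem pvScan_mem (ports : List Int) (L : List (Int × Int × Bool)) (u : Int × Int × Bool)
    (h : pvScan ports L = some u) : u ∈ L := by
  induction L with
  | nil => simp [pvScan] at h
  | cons t L ih =>
    simp only [pvScan] at h
    split at h
    · simp_all
    · exact List.mem_cons_of_mem _ (ih h)

theorem pvFindP_mem (p : Int) (L : List (Int × Int × Bool)) (u : Int × Int × Bool)
    (h : pvFindP p L = some u) : u ∈ L := by
  induction L with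
  | nil => simp [pvFindP] at h
  | cons t L ih =>
    simp only [pvFindP] at h
    split at h
    · simp_all
    · exact List.mem_cons_of_mem _ (ih h)

theorem pvScan_cons (p : Int) (ps : List Int) (L : List (Int × Int × Bool))
    (hs : L.Pairwise (fun a b => a.1 < b.1)) :
    pvScan (p :: ps) L = pvMerge (pvFindP p L) (pvScan ps L) := by
  induction L with
  | nil => rfl
  | cons t L ih =>
    rcases List.pairwise_cons.mp hs with ⟨hlt, hL⟩
    by_cases hp : t.2.1 = p
    · have h1 : pvScan (p :: ps) (t :: L) = some t := by simp [pvScan, hp]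
      have h2 : pvFindP p (t :: L) = some t := by simp [pvFindP, hp]
      rw [h1, h2]
      rcases hscan : pvScan ps (t :: L) with _ | u
      · rfl
      · rcases List.mem_cons.mp (pvScan_mem ps (t :: L) u hscan) with rfl | hu
        · simp [pvMerge]
        · have := hlt u hu
          simp only [pvMerge]
          rw [if_neg (by omega)]
    · by_cases hin : t.2.1 ∈ ps
      · have h1 : pvScan (p :: ps) (t :: L) = some t := by
          simp [pvScan, List.mem_cons_of_mem _ hin]
        have h2 : pvFindP p (t :: L) = pvFindP p L := by simp [pvFindP, hp]
        have h3 : pvScan ps (t :: L) = some t := by simp [pvScan, hin]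
        rw [h1, h2, h3]
        rcases hf : pvFindP p L with _ | v
        · rfl
        · have := hlt v (pvFindP_mem p L v hf)
          simp only [pvMerge]
          rw [if_pos (by omega)]
      · have hmem : t.2.1 ∉ p :: ps := by simp [List.mem_cons, hp, hin]
        have h1 : pvScan (p :: ps) (t :: L) = pvScan (p :: ps) L := by
          simp only [pvScan, if_neg hmem]
        have h2 : pvFindP p (t :: L) = pvFindP p L := by simp [pvFindP, hp]
        have h3 : pvScan ps (t :: L) = pvScan ps L := by
          simp only [pvScan, if_neg hin]
        rw [h1, h2, h3]
        exact ih hL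

theorem pvScan_eq_fold (ports : List Int) :
    pvScan ports pvTriples = ports.foldl pickStepB none := by
  induction ports with
  | nil => rfl
  | cons p ps ih =>
    rw [pvScan_cons p ps pvTriples (by decide)]
    simp only [List.foldl_cons]
    rw [foldl_pickStepB_merge ps (pickStepB none p), pickStepB_eq_merge none p]
    simp only [pvMerge]
    rw [ih, pvToOpt_eq_findP]

theorem pick_http_port_eq_finish_scan (ports : List Int) :
    pick_http_port ports = pvFinish (pvScan ports pvTriples) := by
  simp only [pick_http_port, pickLoopA, pvFinish, pvScan, pvTriples]
  by_cases h0 : (80 : Int) ∈ ports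
  · simp [h0]
  · simp only [if_neg h0]
    by_cases h1 : (8080 : Int) ∈ ports
    · simp [h1]
    · simp only [if_neg h1]
      by_cases h2 : (8000 : Int) ∈ ports
      · simp [h2]
      · simp only [if_neg h2]
        by_cases h3 : (8008 : Int) ∈ ports
        · simp [h3]
        · simp only [if_neg h3]
          by_cases h4 : (9080 : Int) ∈ ports
          · simp [h4]
          · simp only [if_neg h4]
            by_cases h5 : (8888 : Int) ∈ ports
            · simp [h5]
            · simp only [if_neg h5]
              by_cases h6 : (3000 : Int) ∈ ports
              · simp [h6]
              · simp only [if_neg h6]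
                by_cases h7 : (5000 : Int) ∈ ports
                · simp [h7]
                · simp only [if_neg h7]
                  by_cases h8 : (443 : Int) ∈ ports
                  · simp [h8]
                  · simp only [if_neg h8]
                    by_cases h9 : (8443 : Int) ∈ ports
                    · simp [h9]
                    · simp only [if_neg h9]
                      by_cases h10 : (9443 : Int) ∈ ports
                      · simp [h10]
                      · simp only [if_neg h10]

-- ===== VERDICT (by name: the statement is the Claim_ definition above) =====
theorem pick_http_port_spec : Claim_equal_pick_http_port := by
  intro ports _
  unfold Spec_pick_http_port pick_http_port_alt
  rw [pick_http_port_eq_finish_scan, pvScan_eq_fold]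
  rcases ports.foldl pickStepB none with _ | ⟨r, p, h⟩ <;> rfl
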